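-- pv_equiv track=rewrite | github.com/risingfruition/AOC_2024 | d24.py | get_zs
-- ===== SOURCE A (Python) =====
-- def get_zs(val):
--     bits = []
--     while val > 0:
--         if val % 2 == 0:
--             bits.append(0)
--         else:
--             bits.append(1)
--         val = val // 2
--     zs = {}
--     for i, b in enumerate(bits):
--         if i < 10:
--             zs[f'z0{i}'] = b
--         else:
--             zs[f'z{i}'] = b
--     return zs
-- ===== SOURCE B (Python) =====
-- def get_zs(val):
--     def go(v, i):
--         if v <= 0:
--             return {}
--         zs = {f'z{i:02d}': v & 1}
--         zs.update(go(v >> 1, i + 1))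
--         return zs
--     return go(val, 0)
-- ===== Notes on version B (the rewrite author's own statement) =====
-- stated objective: alternative
-- what changed: Replaces A's two staged passes (a while-loop collecting a bits list by repeated %//, then a relabelling loop over enumerate) with a single recursive function that peels the low bit with &/>> and builds the labelled dict directly back-to-front by suffix construction, with no intermediate list.
import Mathlib
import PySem

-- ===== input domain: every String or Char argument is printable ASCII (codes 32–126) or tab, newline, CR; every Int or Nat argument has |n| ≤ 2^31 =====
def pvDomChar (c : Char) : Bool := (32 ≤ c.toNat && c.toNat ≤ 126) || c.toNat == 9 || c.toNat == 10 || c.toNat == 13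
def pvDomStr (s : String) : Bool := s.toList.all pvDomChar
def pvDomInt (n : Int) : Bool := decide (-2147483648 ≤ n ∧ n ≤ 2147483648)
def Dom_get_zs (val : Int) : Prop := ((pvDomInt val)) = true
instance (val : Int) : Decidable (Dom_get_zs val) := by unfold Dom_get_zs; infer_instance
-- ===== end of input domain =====

-- B replaces A's two staged loops (collect a bits list via %//, then relabel it) with a
-- single recursive function building the labelled dict directly (objective: alternative).


-- ===== PORT A =====
-- while val > 0: append val % 2 as 0/1; val //= 2
def getZsBits (val : Int) : List Int :=
  if _h : 0 < val then
    (if PySem.Int.mod val 2 == 0 then (0 : Int) else 1) :: getZsBits (PySem.Int.floordiv val 2)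
  else []
termination_by val.toNat
decreasing_by
  rw [PySem.Int.floordiv_eq_ediv_of_pos (by omega)]
  omega

def get_zs (val : Int) : List (String × Int) :=
  let bits := getZsBits val
  ((PySem.List.enumerate bits).foldl
    (fun zs ib =>
      zs.insert (if ib.1 < 10 then "z0" ++ PySem.Int.toStr ib.1 else "z" ++ PySem.Int.toStr ib.1) ib.2)
    PySem.Dict.empty).items

-- ===== PORT B =====
-- f'z{i:02d}' : 'z' ++ str(i) left-padded with '0' to width 2 (i is nonnegative here)
def pyFmtZ02 (i : Int) : String :=
  let s := PySem.Int.toStr i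
  "z" ++ (if PySem.Str.len s < 2 then "0" ++ s else s)

-- go(v, i): if v <= 0 return {}; zs = {f'z{i:02d}': v & 1}; zs.update(go(v >> 1, i + 1)); return zs
def getZsGo (v i : Int) : PySem.Dict String Int :=
  if _h : 0 < v then
    (PySem.Dict.empty.insert (pyFmtZ02 i) (PySem.Int.band v 1)).update
      (getZsGo (v >>> (1 : Nat)) (i + 1)).items
  else PySem.Dict.empty
termination_by v.toNat
decreasing_by
  have hs : v >>> (1 : Nat) = v / 2 := by
    rw [Int.shiftRight_eq_div_pow]; norm_num
  omega

def get_zs_alt (val : Int) : List (String × Int) := (getZsGo val 0).items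

-- ===== PRECONDITION & SPEC =====
def Spec_get_zs (val : Int) (out : List (String × Int)) : Prop := out = get_zs_alt val
instance (val : Int) (out : List (String × Int)) : Decidable (Spec_get_zs val out) := by unfold Spec_get_zs; infer_instance

-- ===== CLAIM (what is proved, stated in full; the proofs are below) =====
def Claim_equal_get_zs : Prop := ∀ (val : Int), Dom_get_zs val → Spec_get_zs val (get_zs val)

-- ===== LEMMAS AND PROOFS =====

-- A's bit list is the first bitLength bits of val, least significant first.
theorem bits_spec (val : Int) : getZsBits val =
    (List.range (if 0 < val then PySem.Int.bitLength val else 0)).map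
      (fun k : Nat => PySem.Int.band (val >>> k) 1) := by
  by_cases h : 0 < val
  · rw [getZsBits, dif_pos h, if_pos h]
    have hq0 : 0 ≤ PySem.Int.floordiv val 2 := by
      rw [PySem.Int.floordiv_eq_ediv_of_pos (by omega)]; omega
    have ih := bits_spec (PySem.Int.floordiv val 2)
    have hcond : (if 0 < PySem.Int.floordiv val 2 then
        PySem.Int.bitLength (PySem.Int.floordiv val 2) else 0)
        = PySem.Int.bitLength (PySem.Int.floordiv val 2) := by
      split
      · rfl
      · rw [show PySem.Int.floordiv val 2 = 0 by omega]
        simp [PySem.Int.bitLength_zero]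
    rw [hcond] at ih
    rw [ih, PySem.Int.bitLength_of_pos h, List.range_succ_eq_map, List.map_cons, List.map_map]
    congr 1
    · -- head
      rw [show val >>> (0 : Nat) = val from by
          rw [Int.shiftRight_eq_div_pow]; simp,
        PySem.Int.band_one]
      have hm : PySem.Int.mod val 2 = val % 2 := PySem.Int.mod_eq_emod_of_pos (by omega)
      rcases Int.emod_two_eq val with h2 | h2 <;> rw [hm, h2] <;> simp
    · -- tail
      apply List.map_congr_left
      intro k _
      simp only [Function.comp]
      congr 1
      rw [Int.shiftRight_eq_div_pow, Int.shiftRight_eq_div_pow,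
        PySem.Int.floordiv_eq_ediv_of_pos (by omega : (0:Int) < 2)]
      rw [Int.ediv_ediv_of_nonneg (by omega)]
      congr 1
      push_cast [pow_succ, pow_succ']
      ring
  · rw [getZsBits, dif_neg h, if_neg h]
    simp
termination_by val.toNat
decreasing_by
  rw [PySem.Int.floordiv_eq_ediv_of_pos (by omega)]
  omega

theorem enum_range_map {α : Type} (g : Nat → α) (n : Nat) :
    PySem.List.enumerate ((List.range n).map g)
      = (List.range n).map (fun k : Nat => ((k : Int), g k)) := by
  apply List.ext_getElem
  · simp [PySem.List.length_enumerate]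
  · intro k h1 h2
    rw [PySem.List.getElem_enumerate]
    simp

-- A's key format and B's key format agree on the indices that can occur (0..32).
theorem label_eq : ∀ k : Nat, k < 33 →
    (if (k : Int) < 10 then "z0" ++ PySem.Int.toStr (k : Int)
     else "z" ++ PySem.Int.toStr (k : Int)) = pyFmtZ02 (k : Int) := by decide

theorem label_nodup33 : ((List.range 33).map (fun k : Nat => pyFmtZ02 (k : Int))).Nodup := by decide

theorem fmt_inj (a b : Nat) (ha : a < 33) (hb : b < 33)
    (h : pyFmtZ02 (a : Int) = pyFmtZ02 (b : Int)) : a = b :=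
  List.inj_on_of_nodup_map label_nodup33 (List.mem_range.2 ha) (List.mem_range.2 hb) h

theorem label_nodup (n : Nat) (h : n ≤ 33) :
    ((List.range n).map (fun k : Nat => pyFmtZ02 (k : Int))).Nodup := by
  have hsub : List.Sublist ((List.range n).map (fun k : Nat => pyFmtZ02 (k : Int)))
      ((List.range 33).map (fun k : Nat => pyFmtZ02 (k : Int))) :=
    List.Sublist.map _ (List.range_sublist.2 h)
  exact label_nodup33.sublist hsub

theorem bitLength_le (val : Int) (h : 0 < val) (hle : val ≤ 2147483648) :
    PySem.Int.bitLength val ≤ 32 := by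
  have h1 := PySem.Int.two_pow_bitLength_le val (by omega)
  have h2 : val.natAbs ≤ 2 ^ 31 := by omega
  by_contra hgt
  have : 2 ^ 32 ≤ 2 ^ (PySem.Int.bitLength val - 1) :=
    Nat.pow_le_pow_right (by omega) (by omega)
  omega

theorem shiftRight_one (v : Int) : v >>> (1 : Nat) = v / 2 := by
  rw [Int.shiftRight_eq_div_pow]; norm_num

-- B's recursive dict, as a list: the labelled bits of v starting at index i.
theorem go_items (v : Int) : ∀ i : Nat,
    i + PySem.Int.bitLength v ≤ 33 →
    (getZsGo v (i : Int)).items =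
      (List.range (if 0 < v then PySem.Int.bitLength v else 0)).map
        (fun k : Nat => (pyFmtZ02 ((i + k : Nat) : Int), PySem.Int.band (v >>> k) 1)) := by
  intro i hbound
  by_cases h : 0 < v
  · rw [getZsGo, dif_pos h, if_pos h]
    have hs : v >>> (1 : Nat) = v / 2 := shiftRight_one v
    have hfd : PySem.Int.floordiv v 2 = v / 2 := PySem.Int.floordiv_eq_ediv_of_pos (by omega)
    have hbl : PySem.Int.bitLength v = PySem.Int.bitLength (v >>> (1 : Nat)) + 1 := by
      rw [PySem.Int.bitLength_of_pos h, hfd, hs]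
    have ih := go_items (v >>> (1 : Nat)) (i + 1) (by omega)
    have hcast : ((i : Int) + 1) = (((i + 1 : Nat)) : Int) := by push_cast; ring
    rw [hcast] at *
    have hcond : (if 0 < v >>> (1 : Nat) then PySem.Int.bitLength (v >>> (1 : Nat)) else 0)
        = PySem.Int.bitLength (v >>> (1 : Nat)) := by
      split
      · rfl
      · rw [show v >>> (1 : Nat) = 0 by rw [hs]; omega]
        simp [PySem.Int.bitLength_zero]
    rw [hcond] at ih
    set n := PySem.Int.bitLength (v >>> (1 : Nat)) with hn
    -- the recursive items list: fresh distinct keys, so update appends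
    rw [ih]
    simp only [PySem.Dict.update]
    rw [PySem.Dict.items_foldl_insert_fresh _ Prod.fst Prod.snd _
        (by
          intro p hp
          rw [List.mem_map] at hp
          obtain ⟨k, hk, hpk⟩ := hp
          rw [List.mem_range] at hk
          subst hpk
          simp only [PySem.Dict.contains_insert, PySem.Dict.contains_empty, Bool.or_false]
          rw [beq_eq_false_iff_ne]
          intro hcontra
          have := fmt_inj _ _ (by omega) (by omega) hcontra
          omega)
        (by
          rw [List.map_map]
          apply List.Nodup.map_on
          · intro a hha b hhb hfab
            simp only [Function.comp] at hfab
            rw [List.mem_range] at hha hhb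
            have := fmt_inj _ _ (by omega) (by omega) hfab
            omega
          · exact List.nodup_range)]
    rw [hbl, List.range_succ_eq_map, List.map_cons, List.map_map, List.map_map,
      PySem.Dict.items_insert_of_not_contains _ _ rfl,
      show (PySem.Dict.empty : PySem.Dict String Int).items = [] from rfl, List.nil_append]
    have hv0 : v >>> (0 : Nat) = v := by rw [Int.shiftRight_eq_div_pow]; simp
    simp [hv0]
    intro a ha
    refine ⟨by rw [show ((i : Int) + 1 + (a : Int)) = (i : Int) + ((a : Int) + 1) from by ring], ?_⟩
    rw [Int.shiftRight_eq_div_pow, Int.shiftRight_eq_div_pow, Int.shiftRight_eq_div_pow,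
      Int.ediv_ediv_of_nonneg (by positivity)]
    congr 1
    push_cast [pow_succ, pow_succ']
    ring_nf
  · rw [getZsGo, dif_neg h, if_neg h]
    rfl
termination_by v.toNat
decreasing_by
  omega

-- ===== VERDICT (by name: the statement is the Claim_ definition above) =====
theorem get_zs_spec : Claim_equal_get_zs := by
  intro val hdom
  show get_zs val = get_zs_alt val
  have hdom' : val ≤ 2147483648 := by
    have := of_decide_eq_true hdom
    omega
  have hbl33 : PySem.Int.bitLength val ≤ 33 ∨ ¬ 0 < val := by
    by_cases h : 0 < val
    · exact Or.inl (by have := bitLength_le val h hdom'; omega)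
    · exact Or.inr h
  unfold get_zs get_zs_alt
  rw [bits_spec]
  by_cases h : 0 < val
  · have hm32 : PySem.Int.bitLength val ≤ 32 := bitLength_le val h hdom'
    have hgo := go_items val 0 (by omega)
    rw [show ((0 : Nat) : Int) = (0 : Int) from rfl] at hgo
    rw [hgo]
    simp only [if_pos h]
    set m := PySem.Int.bitLength val with hm
    rw [enum_range_map]
    rw [PySem.Dict.items_foldl_insert_fresh _
      (fun ib : Int × Int => if ib.1 < 10 then "z0" ++ PySem.Int.toStr ib.1 else "z" ++ PySem.Int.toStr ib.1)
      (fun ib : Int × Int => ib.2) _ (by intro a _; rfl)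
      (by
        rw [List.map_map]
        have : ((List.range m).map
            ((fun ib : Int × Int => if ib.1 < 10 then "z0" ++ PySem.Int.toStr ib.1
              else "z" ++ PySem.Int.toStr ib.1) ∘ fun k : Nat => ((k : Int), PySem.Int.band (val >>> k) 1)))
            = (List.range m).map (fun k : Nat => pyFmtZ02 (k : Int)) := by
          apply List.map_congr_left
          intro k hk
          exact label_eq k (by simp at hk; omega)
        rw [this]
        exact label_nodup m (by omega))]
    rw [List.map_map]
    rw [show (PySem.Dict.empty : PySem.Dict String Int).items = [] from rfl, List.nil_append]
    apply List.map_congr_left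
    intro k hk
    simp only [Function.comp]
    rw [label_eq k (by simp at hk; omega)]
    simp
  · simp only [if_neg h]
    rw [getZsGo, dif_neg h]
    simp [PySem.List.enumerate_nil]
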